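-- pv_equiv track=rewrite | github.com/olivier555/Projet-MOPSI | ObtentionListePartage.py | partage_partie
-- ===== SOURCE A (Python) =====
-- def partage_partie(partie, taille_collier):
--     """Renvoit le partage du collier de taille_collier
--     correspondant a  la partie partie"""
--
--     partage = []
--     for i in range(taille_collier):
--         if i in partie:
--             partage.append(1)
--         else:
--             partage.append(-1)
--     return partage
-- ===== SOURCE B (Python) =====
-- def partage_partie(partie, taille_collier):
--     """Renvoit le partage du collier de taille_collier
--     correspondant a  la partie partie"""
--     partage = [-1] * taille_collier
--     for i in partie:
--         if 0 <= i < taille_collier: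
--             partage[i] = 1
--     return partage
-- ===== Notes on version B (the rewrite author's own statement) =====
-- stated objective: alternative
-- what changed: B preallocates a [-1]*n array and scatters 1s at the in-range member indices by iterating over partie, instead of scanning every index of range(n) and deciding each cell with a membership test.
import Mathlib
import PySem

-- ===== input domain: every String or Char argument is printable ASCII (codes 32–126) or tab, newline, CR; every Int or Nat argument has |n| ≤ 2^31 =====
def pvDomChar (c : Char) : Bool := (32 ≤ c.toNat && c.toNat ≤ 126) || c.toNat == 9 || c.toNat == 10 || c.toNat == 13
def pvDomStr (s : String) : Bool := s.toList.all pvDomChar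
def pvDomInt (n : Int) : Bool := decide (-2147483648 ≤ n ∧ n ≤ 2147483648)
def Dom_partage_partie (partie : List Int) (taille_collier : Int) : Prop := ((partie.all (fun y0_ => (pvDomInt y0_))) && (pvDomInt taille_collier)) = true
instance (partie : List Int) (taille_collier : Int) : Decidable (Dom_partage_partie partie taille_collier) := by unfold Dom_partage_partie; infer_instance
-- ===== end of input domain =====

-- B preallocates a [-1]*n array and scatters 1s at the in-range member indices instead of
-- testing membership at every index of range(n); equivalence of return values is proved below.

-- ===== PORT A =====
-- for i in range(taille_collier): append(1 if i in partie else -1)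
def partage_partie (partie : List Int) (taille_collier : Int) : List Int :=
  (PySem.List.pyRange 0 taille_collier 1).foldl
    (fun partage i => partage ++ [if partie.contains i then 1 else -1]) []

-- ===== PORT B =====
-- partage = [-1]*taille_collier; for i in partie: if 0 <= i < taille_collier: partage[i] = 1
def partage_partie_alt (partie : List Int) (taille_collier : Int) : List Int :=
  partie.foldl
    (fun partage i =>
      if 0 ≤ i ∧ i < taille_collier then partage.set i.toNat 1 else partage)
    (List.replicate taille_collier.toNat (-1))

-- ===== PRECONDITION & SPEC =====
def Spec_partage_partie (partie : List Int) (taille_collier : Int) (out : List Int) : Prop := out = partage_partie_alt partie taille_collier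
instance (partie : List Int) (taille_collier : Int) (out : List Int) : Decidable (Spec_partage_partie partie taille_collier out) := by unfold Spec_partage_partie; infer_instance

-- ===== CLAIM (what is proved, stated in full; the proofs are below) =====
def Claim_equal_partage_partie : Prop := ∀ (partie : List Int) (taille_collier : Int), Dom_partage_partie partie taille_collier → Spec_partage_partie partie taille_collier (partage_partie partie taille_collier)

-- ===== LEMMAS AND PROOFS =====

-- A's loop, which appends one element per index, is the map of its body over the range.
theorem pv_foldl_append_map (g : Int → Int) :
    ∀ (l : List Int) (acc : List Int),
      l.foldl (fun a i => a ++ [g i]) acc = acc ++ l.map g := by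
  intro l
  induction l with
  | nil => simp
  | cons i l ih => intro acc; simp [List.foldl_cons, ih]

-- B's scatter loop preserves the length of the accumulator.
theorem pv_scatter_length (t : Int) :
    ∀ (l : List Int) (acc : List Int),
      (l.foldl (fun a i => if 0 ≤ i ∧ i < t then a.set i.toNat 1 else a) acc).length
        = acc.length := by
  intro l
  induction l with
  | nil => simp
  | cons i l ih =>
      intro acc
      simp only [List.foldl_cons]
      by_cases h : 0 ≤ i ∧ i < t
      · simp [h, ih]
      · simp [h, ih]

-- Cell j of B's scatter loop: 1 iff j occurred among the processed members, else untouched.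
theorem pv_scatter_getElem? (t : Int) (j : Nat) (hj : (j : Int) < t) :
    ∀ (l : List Int) (acc : List Int), j < acc.length →
      (l.foldl (fun a i => if 0 ≤ i ∧ i < t then a.set i.toNat 1 else a) acc)[j]?
        = if (j : Int) ∈ l then some 1 else acc[j]? := by
  intro l
  induction l with
  | nil => intro acc _; simp
  | cons i l ih =>
      intro acc hlen
      simp only [List.foldl_cons]
      by_cases hji : (j : Int) = i
      · subst hji
        have hcond : (0:Int) ≤ (j:Int) ∧ (j:Int) < t := ⟨Int.natCast_nonneg j, hj⟩
        rw [if_pos hcond]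
        have htn : ((j:Int)).toNat = j := Int.toNat_natCast j
        rw [htn]
        rw [ih (acc.set j 1) (by simpa using hlen)]
        by_cases hm : (j : Int) ∈ l
        · simp [hm]
        · simp [hm, hlen]
      · have hmem : ((j : Int) ∈ i :: l) ↔ ((j : Int) ∈ l) := by
          simp [List.mem_cons, hji]
        by_cases hcond : 0 ≤ i ∧ i < t
        · rw [if_pos hcond]
          rw [ih (acc.set i.toNat 1) (by simpa using hlen)]
          have hne : i.toNat ≠ j := by
            intro h; apply hji
            have := congrArg (Int.ofNat) h
            simpa [Int.toNat_of_nonneg hcond.1] using this.symm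
          rw [List.getElem?_set_ne hne]; simp only [hmem]
        · rw [if_neg hcond, ih acc hlen]; simp only [hmem]

-- Pointwise description of B's result.
theorem pv_alt_getElem? (partie : List Int) (t : Int) (j : Nat) :
    (partage_partie_alt partie t)[j]?
      = if j < t.toNat then some (if (j : Int) ∈ partie then 1 else -1) else none := by
  unfold partage_partie_alt
  by_cases hj : j < t.toNat
  · have hjt : (j : Int) < t := by omega
    rw [pv_scatter_getElem? t j hjt partie _ (by simpa using hj)]
    by_cases hm : (j : Int) ∈ partie
    · simp [hm, hj]
    · simp [hm, hj]
  · have : (partie.foldl (fun a i => if 0 ≤ i ∧ i < t then a.set i.toNat 1 else a)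
        (List.replicate t.toNat (-1)))[j]? = none := by
      apply List.getElem?_eq_none
      rw [pv_scatter_length]
      simpa using Nat.le_of_not_lt hj
    simp [this, hj]

-- Pointwise description of A's result.
theorem pv_a_getElem? (partie : List Int) (t : Int) (j : Nat) :
    (partage_partie partie t)[j]?
      = if j < t.toNat then some (if (j : Int) ∈ partie then 1 else -1) else none := by
  unfold partage_partie
  rw [pv_foldl_append_map]
  rw [PySem.List.pyRange_one]
  simp only [List.nil_append, List.map_map, List.getElem?_map]
  by_cases hj : j < (t - 0).toNat
  · rw [List.getElem?_range hj]
    have hj' : j < t.toNat := by omega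
    simp [hj']
  · rw [List.getElem?_eq_none (by simpa using Nat.le_of_not_lt hj)]
    have hj' : ¬ j < t.toNat := by omega
    simp [hj']

-- ===== VERDICT (by name: the statement is the Claim_ definition above) =====
theorem partage_partie_spec : Claim_equal_partage_partie := by
  intro partie t _
  unfold Spec_partage_partie
  apply List.ext_getElem?
  intro j
  rw [pv_a_getElem?, pv_alt_getElem?]
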